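-- pv_equiv track=rewrite | github.com/AimadOufares/uca_digital_assistant | rag_module/retrieval/rag_search.py | truncate_chunks
-- ===== SOURCE A (Python) =====
-- from typing import Any, Dict, List, Optional, Set, Tuple
--
-- MAX_CONTEXT_CHARS = 2500
--
-- def truncate_chunks(chunks_list: List[Dict], max_chars: int = MAX_CONTEXT_CHARS) -> List[Dict]:
--     total = 0
--     selected = []
--     for chunk in chunks_list:
--         text = chunk.get("text", "")
--         if total + len(text) > max_chars and selected:
--             break
--         selected.append(chunk)
--         total += len(text)
--     return selected
-- ===== SOURCE B (Python) =====
-- from itertools import accumulate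
-- from bisect import bisect_right
--
-- MAX_CONTEXT_CHARS = 2500
--
-- def truncate_chunks(chunks_list, max_chars=MAX_CONTEXT_CHARS):
--     if not chunks_list:
--         return []
--     cumulative = list(accumulate(len(c.get("text", "")) for c in chunks_list))
--     cut = bisect_right(cumulative, max_chars)
--     return chunks_list[:max(cut, 1)]
-- ===== Notes on version B (the rewrite author's own statement) =====
-- stated objective: alternative
-- what changed: Replaces the accumulate-and-break loop by a prefix-sum table (itertools.accumulate) plus a binary search (bisect_right) for the cutoff index, keeping at least the first chunk.
import Mathlib
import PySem

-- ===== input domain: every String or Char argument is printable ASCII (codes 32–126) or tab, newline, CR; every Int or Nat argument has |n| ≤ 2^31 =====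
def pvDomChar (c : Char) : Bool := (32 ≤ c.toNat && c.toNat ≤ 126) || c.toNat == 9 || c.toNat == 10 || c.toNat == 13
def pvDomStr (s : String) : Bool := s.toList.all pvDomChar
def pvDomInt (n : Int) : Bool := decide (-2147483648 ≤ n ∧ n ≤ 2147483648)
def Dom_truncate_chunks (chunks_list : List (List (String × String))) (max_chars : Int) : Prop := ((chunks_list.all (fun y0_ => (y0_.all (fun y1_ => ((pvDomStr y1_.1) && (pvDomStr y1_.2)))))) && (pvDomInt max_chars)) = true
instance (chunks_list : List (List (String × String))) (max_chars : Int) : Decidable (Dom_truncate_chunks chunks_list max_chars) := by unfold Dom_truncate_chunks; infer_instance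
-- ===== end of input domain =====

-- B replaces the accumulate-and-break loop by a prefix-sum table plus a bisect_right binary search for the cutoff (alternative decomposition, same behaviour).
-- ===== PORT A =====
def truncate_chunks_go (max_chars : Int) (cs : List (List (String × String)))
    (total : Int) (selected : List (List (String × String))) : List (List (String × String)) :=
  match cs with
  | [] => selected
  | chunk :: rest =>
    let text := PySem.Dict.getD (PySem.Dict.mk chunk) "text" ""
    if total + PySem.Str.len text > max_chars ∧ selected ≠ [] then selected
    else truncate_chunks_go max_chars rest (total + PySem.Str.len text) (selected ++ [chunk])

def truncate_chunks (chunks_list : List (List (String × String))) (max_chars : Int) : List (List (String × String)) :=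
  truncate_chunks_go max_chars chunks_list 0 []


-- ===== PORT B =====
-- hand port of bisect.bisect_right's binary-search loop (exact: same lo/hi/mid updates)
def pvBisectRight (a : List Int) (x : Int) (lo hi : Nat) : Nat :=
  if h : lo < hi then
    let mid := (lo + hi) / 2
    if x < a.getD mid 0 then pvBisectRight a x lo mid
    else pvBisectRight a x (mid + 1) hi
  else lo
termination_by hi - lo
decreasing_by all_goals omega

-- hand port of itertools.accumulate over the lengths (running sums, exact)
def pvAccumulate (ls : List Int) (acc : Int) : List Int :=
  match ls with
  | [] => []
  | l :: rest => (acc + l) :: pvAccumulate rest (acc + l)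

def truncate_chunks_alt (chunks_list : List (List (String × String))) (max_chars : Int) : List (List (String × String)) :=
  if chunks_list = [] then []
  else
    let cumulative := pvAccumulate (chunks_list.map (fun c => PySem.Str.len (PySem.Dict.getD (PySem.Dict.mk c) "text" ""))) 0
    let cut := pvBisectRight cumulative max_chars 0 cumulative.length
    chunks_list.take (Nat.max cut 1)


-- ===== PRECONDITION & SPEC =====
def Spec_truncate_chunks (chunks_list : List (List (String × String))) (max_chars : Int) (out : List (List (String × String))) : Prop := out = truncate_chunks_alt chunks_list max_chars
instance (chunks_list : List (List (String × String))) (max_chars : Int) (out : List (List (String × String))) : Decidable (Spec_truncate_chunks chunks_list max_chars out) := by unfold Spec_truncate_chunks; infer_instance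

-- ===== CLAIM (what is proved, stated in full; the proofs are below) =====
def Claim_equal_truncate_chunks : Prop := ∀ (chunks_list : List (List (String × String))) (max_chars : Int), Dom_truncate_chunks chunks_list max_chars → Spec_truncate_chunks chunks_list max_chars (truncate_chunks chunks_list max_chars)

-- ===== LEMMAS AND PROOFS =====

-- length of the "text" value of a chunk (proof abbreviation)
def pvLen (c : List (String × String)) : Int :=
  PySem.Str.len (PySem.Dict.getD (PySem.Dict.mk c) "text" "")

lemma pvLen_nonneg (c : List (String × String)) : 0 ≤ pvLen c := by
  simp [pvLen]

-- index (= count) at which the running totals first exceed the budget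
def pvCutoff (a : List Int) (x : Int) : Nat :=
  (a.takeWhile (fun v => v ≤ x)).length

lemma pvCutoff_nil (x : Int) : pvCutoff [] x = 0 := rfl

lemma pvCutoff_cons (a : Int) (as : List Int) (x : Int) :
    pvCutoff (a :: as) x = if a ≤ x then pvCutoff as x + 1 else 0 := by
  simp [pvCutoff, List.takeWhile_cons]
  split_ifs <;> simp

lemma pvCutoff_le (a : List Int) (x : Int) : pvCutoff a x ≤ a.length := by
  induction a with
  | nil => simp [pvCutoff_nil]
  | cons h t ih => rw [pvCutoff_cons]; split_ifs <;> simp only [List.length_cons] <;> omega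

lemma pvCutoff_prop1 (a : List Int) (x : Int) :
    ∀ i, i < pvCutoff a x → a.getD i 0 ≤ x := by
  induction a with
  | nil => simp [pvCutoff_nil]
  | cons h t ih =>
    intro i hi
    rw [pvCutoff_cons] at hi
    split_ifs at hi with hh
    · cases i with
      | zero => simpa using hh
      | succ j => simpa using ih j (by omega)
    · omega

lemma pvCutoff_prop2 (a : List Int) (x : Int) :
    pvCutoff a x < a.length → x < a.getD (pvCutoff a x) 0 := by
  induction a with
  | nil => simp [pvCutoff_nil]
  | cons h t ih =>
    rw [pvCutoff_cons]
    split_ifs with hh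
    · intro hl; simpa using ih (by simpa using hl)
    · intro _; simpa using not_le.mp hh

lemma pvCutoff_unique (a : List Int) (x : Int) (N : Nat)
    (hN : N ≤ a.length)
    (h1 : ∀ i, i < N → a.getD i 0 ≤ x)
    (h2 : N < a.length → x < a.getD N 0) : N = pvCutoff a x := by
  rcases lt_trichotomy N (pvCutoff a x) with h | h | h
  · have hx := pvCutoff_prop1 a x N h
    have hx2 := h2 (lt_of_lt_of_le h (pvCutoff_le a x))
    exact absurd hx (not_le.mpr hx2)
  · exact h
  · have hx := h1 (pvCutoff a x) h
    have hx2 := pvCutoff_prop2 a x (lt_of_lt_of_le h hN)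
    exact absurd hx (not_le.mpr hx2)

lemma pvBisectRight_eq_aux (a : List Int) (x : Int)
    (hs : ∀ i j : Nat, i ≤ j → j < a.length → a.getD i 0 ≤ a.getD j 0) :
    ∀ n lo hi, hi - lo ≤ n → lo ≤ hi → hi ≤ a.length →
      (∀ i, i < lo → a.getD i 0 ≤ x) →
      (∀ i, hi ≤ i → i < a.length → x < a.getD i 0) →
      pvBisectRight a x lo hi = pvCutoff a x := by
  intro n
  induction n with
  | zero =>
    intro lo hi hn hlh hha hlo hhi
    have : ¬ lo < hi := by omega
    rw [pvBisectRight, dif_neg this]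
    exact pvCutoff_unique a x lo (by omega) hlo (fun h => hhi lo (by omega) h)
  | succ n ih =>
    intro lo hi hn hlh hha hlo hhi
    by_cases hlt : lo < hi
    · rw [pvBisectRight, dif_pos hlt]
      by_cases hx : x < a.getD ((lo + hi) / 2) 0
      · simp only [hx, if_pos]
        exact ih lo ((lo + hi) / 2) (by omega) (by omega) (by omega) hlo
          (fun i hmi hil =>
            lt_of_lt_of_le hx (hs ((lo + hi) / 2) i hmi hil))
      · simp only [hx, if_neg, not_false_iff]
        exact ih ((lo + hi) / 2 + 1) hi (by omega) (by omega) hha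
          (fun i hi' => by
            by_cases hil : i < lo
            · exact hlo i hil
            · have h1 : a.getD i 0 ≤ a.getD ((lo + hi) / 2) 0 :=
                hs i ((lo + hi) / 2) (by omega) (by omega)
              exact le_trans h1 (not_lt.mp hx))
          hhi
    · rw [pvBisectRight, dif_neg hlt]
      exact pvCutoff_unique a x lo (by omega) hlo (fun h => hhi lo (by omega) h)

lemma pvBisectRight_eq (a : List Int) (x : Int)
    (hs : ∀ i j : Nat, i ≤ j → j < a.length → a.getD i 0 ≤ a.getD j 0) :
    pvBisectRight a x 0 a.length = pvCutoff a x :=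
  pvBisectRight_eq_aux a x hs a.length 0 a.length (by omega) (by omega) (le_refl _)
    (fun i hi => absurd hi (by omega)) (fun i h1 h2 => absurd h2 (by omega))

lemma pvAccumulate_le_mem (ls : List Int) (t : Int) (h : ∀ l ∈ ls, 0 ≤ l) :
    ∀ v ∈ pvAccumulate ls t, t ≤ v := by
  induction ls generalizing t with
  | nil => simp [pvAccumulate]
  | cons l r ih =>
    intro v hv
    rw [pvAccumulate, List.mem_cons] at hv
    rcases hv with rfl | hv
    · have := h l (by simp); omega
    · have h0 := h l (by simp)
      have := ih (t + l) (fun x hx => h x (by simp [hx])) v hv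
      omega

lemma pvAccumulate_pairwise (ls : List Int) (t : Int) (h : ∀ l ∈ ls, 0 ≤ l) :
    (pvAccumulate ls t).Pairwise (· ≤ ·) := by
  induction ls generalizing t with
  | nil => simp [pvAccumulate]
  | cons l r ih =>
    refine List.pairwise_cons.mpr ⟨?_, ih (t + l) (fun x hx => h x (by simp [hx]))⟩
    exact pvAccumulate_le_mem r (t + l) (fun x hx => h x (by simp [hx]))

lemma pairwise_getD_mono (a : List Int) (hp : a.Pairwise (· ≤ ·)) :
    ∀ i j : Nat, i ≤ j → j < a.length → a.getD i 0 ≤ a.getD j 0 := by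
  intro i j hij hj
  rcases eq_or_lt_of_le hij with rfl | hlt
  · exact le_refl _
  · have := List.pairwise_iff_get.mp hp ⟨i, by omega⟩ ⟨j, hj⟩ hlt
    rw [List.getD_eq_getElem a 0 (by omega), List.getD_eq_getElem a 0 hj]
    simpa [List.get_eq_getElem] using this

lemma truncate_chunks_go_eq (m : Int) :
    ∀ (cs : List (List (String × String))) (t : Int)
      (sel : List (List (String × String))), sel ≠ [] →
      truncate_chunks_go m cs t sel =
        sel ++ cs.take (pvCutoff (pvAccumulate (cs.map
          (fun c => PySem.Str.len (PySem.Dict.getD (PySem.Dict.mk c) "text" ""))) t) m) := by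
  intro cs
  induction cs with
  | nil => intro t sel _; simp [truncate_chunks_go, pvAccumulate, pvCutoff_nil]
  | cons c rest ih =>
    intro t sel hsel
    rw [truncate_chunks_go]
    simp only [List.map_cons, pvAccumulate, pvCutoff_cons]
    by_cases hc : t + PySem.Str.len (PySem.Dict.getD (PySem.Dict.mk c) "text" "") > m
    · rw [if_pos ⟨hc, hsel⟩, if_neg (not_le.mpr hc)]
      simp
    · rw [if_neg (fun hand => hc hand.1), if_pos (not_lt.mp hc),
        ih (t + PySem.Str.len (PySem.Dict.getD (PySem.Dict.mk c) "text" ""))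
          (sel ++ [c]) (by simp)]
      simp [List.take_succ_cons]

-- ===== VERDICT (by name: the statement is the Claim_ definition above) =====
theorem truncate_chunks_spec : Claim_equal_truncate_chunks := by
  intro chunks_list max_chars _
  unfold Spec_truncate_chunks
  cases chunks_list with
  | nil => rfl
  | cons c rest =>
    have hnn : ∀ l ∈ (c :: rest).map
        (fun c => PySem.Str.len (PySem.Dict.getD (PySem.Dict.mk c) "text" "")), 0 ≤ l := by
      intro l hl
      rcases List.mem_map.mp hl with ⟨y, _, rfl⟩
      exact pvLen_nonneg y
    have hbis :
        pvBisectRight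
            (pvAccumulate ((c :: rest).map
              (fun c => PySem.Str.len (PySem.Dict.getD (PySem.Dict.mk c) "text" ""))) 0)
            max_chars 0
            (pvAccumulate ((c :: rest).map
              (fun c => PySem.Str.len (PySem.Dict.getD (PySem.Dict.mk c) "text" ""))) 0).length =
          pvCutoff
            (pvAccumulate ((c :: rest).map
              (fun c => PySem.Str.len (PySem.Dict.getD (PySem.Dict.mk c) "text" ""))) 0)
            max_chars :=
      pvBisectRight_eq _ _
        (pairwise_getD_mono _ (pvAccumulate_pairwise _ 0 hnn))
    have hA : truncate_chunks (c :: rest) max_chars =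
        c :: rest.take (pvCutoff (pvAccumulate (rest.map
            (fun c => PySem.Str.len (PySem.Dict.getD (PySem.Dict.mk c) "text" "")))
          (0 + PySem.Str.len (PySem.Dict.getD (PySem.Dict.mk c) "text" ""))) max_chars) := by
      rw [truncate_chunks, truncate_chunks_go]
      rw [if_neg (by simp)]
      simp only [List.nil_append]
      rw [truncate_chunks_go_eq max_chars rest _ [c] (by simp)]
      simp only [List.singleton_append]
    have hB : truncate_chunks_alt (c :: rest) max_chars =
        List.take ((pvBisectRight
            (pvAccumulate ((c :: rest).map
              (fun c => PySem.Str.len (PySem.Dict.getD (PySem.Dict.mk c) "text" ""))) 0)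
            max_chars 0
            (pvAccumulate ((c :: rest).map
              (fun c => PySem.Str.len (PySem.Dict.getD (PySem.Dict.mk c) "text" ""))) 0).length).max 1)
          (c :: rest) := by
      rw [truncate_chunks_alt, if_neg (by simp)]
    rw [hA, hB, hbis]
    simp only [List.map_cons, pvAccumulate, pvCutoff_cons]
    by_cases hc : 0 + PySem.Str.len (PySem.Dict.getD (PySem.Dict.mk c) "text" "") ≤ max_chars
    · rw [if_pos hc]
      simp [List.take_succ_cons]
    · rw [if_neg hc]
      have hk : pvCutoff
          (pvAccumulate (rest.map
            (fun c => PySem.Str.len (PySem.Dict.getD (PySem.Dict.mk c) "text" "")))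
            (0 + PySem.Str.len (PySem.Dict.getD (PySem.Dict.mk c) "text" ""))) max_chars = 0 := by
        cases rest with
        | nil => simp [pvAccumulate, pvCutoff_nil]
        | cons r rs =>
          simp only [List.map_cons, pvAccumulate, pvCutoff_cons]
          rw [if_neg (by
            have := pvLen_nonneg r
            simp only [pvLen] at this
            omega)]
      rw [hk]
      simp
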